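-- pv_equiv track=rewrite | github.com/xmy314/3d-wfc | mainv3.py | decipher_file_name
-- ===== SOURCE A (Python) =====
-- def decipher_file_name(name):
--     decoded=[]
--     current_label=""
--     current_orientation=0
--
--     for character in name:
--         if character == "-" or character == ".":
--             decoded.append((current_label,current_orientation))
--             current_label=""
--             current_orientation=0
--             if character==".":
--                 return decoded
--         elif character.isnumeric():
--             current_orientation=int(character)
--         else :
--             current_label+=character
-- ===== SOURCE B (Python) =====
-- def decipher_file_name(name):
--     idx = name.find('.')
--     if idx == -1:
--         return None
--     out = []
--     for seg in name[:idx].split('-'):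
--         label = ''.join(c for c in seg if not c.isnumeric())
--         digits = [c for c in seg if c.isnumeric()]
--         out.append((label, int(digits[-1]) if digits else 0))
--     return out
-- ===== Notes on version B (the rewrite author's own statement) =====
-- stated objective: idiomatic
-- what changed: Replaces the character-at-a-time state machine with an index-first decomposition: locate the first dot with find, slice the prefix, split it on '-', and compute each segment's label (non-digit chars joined) and orientation (last digit, else 0) independently.
-- outside the precondition, e.g. on decipher_file_name('abc'): A returns None, B returns None; on decipher_file_name('-'): A returns None, B returns None
import Mathlib
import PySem

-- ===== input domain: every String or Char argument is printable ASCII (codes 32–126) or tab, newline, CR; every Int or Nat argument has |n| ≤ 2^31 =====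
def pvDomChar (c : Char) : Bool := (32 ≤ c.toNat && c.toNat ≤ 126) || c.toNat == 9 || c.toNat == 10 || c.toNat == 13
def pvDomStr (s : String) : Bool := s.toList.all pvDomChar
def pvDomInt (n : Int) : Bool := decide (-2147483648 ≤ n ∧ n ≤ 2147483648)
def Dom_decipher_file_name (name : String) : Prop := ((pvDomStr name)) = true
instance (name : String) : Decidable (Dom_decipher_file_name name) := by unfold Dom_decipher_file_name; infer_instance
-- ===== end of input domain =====

-- B replaces A's character-at-a-time state machine by find-the-dot / slice / split-on-'-' /
-- per-segment label+orientation computation (idiomatic; a timing run measured it faster by a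
-- constant factor: C-level find/split instead of a per-character Python loop); equal on every name containing '.'.


-- ===== PORT A =====
-- A's loop; the label accumulator is kept as List Char (appended at the right end, as '+=' does)
-- because Lean's String append is kernel-opaque; 'character.isnumeric()' is PySem.Chars.isdigit
-- (exact on the printable-ASCII domain) and 'int(character)' on a digit is its code minus 48.
-- Returns none exactly where the Python falls off the loop and returns None (no '.').
def pvLoopA : List Char → List (String × Int) → List Char → Int → Option (List (String × Int))
  | [], _, _, _ => none
  | c :: rest, decoded, lab, ori =>
    if c = '-' ∨ c = '.' then
      if c = '.' then some (decoded ++ [(String.ofList lab, ori)])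
      else pvLoopA rest (decoded ++ [(String.ofList lab, ori)]) [] 0
    else if PySem.Chars.isdigit c then pvLoopA rest decoded lab ((c.toNat : Int) - 48)
    else pvLoopA rest decoded (lab ++ [c]) ori

def decipher_file_name (name : String) : List (String × Int) :=
  (pvLoopA name.toList [] [] 0).getD []   -- the None case (no '.') is outside Pre_

-- ===== PORT B =====
-- per-segment computation of Source B's loop body: label = join of non-digit chars,
-- orientation = int of the last digit ([-1] = getLast?) or 0.
def pvSeg (seg : List Char) : String × Int :=
  (String.ofList (seg.filter (fun c => !(PySem.Chars.isdigit c))),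
   match (seg.filter (fun c => PySem.Chars.isdigit c)).getLast? with
   | some d => ((d.toNat : Int) - 48)
   | none => 0)

def decipher_file_name_alt (name : String) : List (String × Int) :=
  let cs := name.toList
  let idx := PySem.Chars.find cs ['.']
  if idx = -1 then []   -- Source B returns None here; outside Pre_
  else (PySem.Chars.splitOn (PySem.Chars.slice cs none (some idx)) ['-']).map pvSeg

-- ===== PRECONDITION & SPEC =====
-- Pre_ excludes names without a '.': there A (and Source B) return None, which is not a list value.
def Pre_decipher_file_name (name : String) : Prop := '.' ∈ name.toList
instance (name : String) : Decidable (Pre_decipher_file_name name) := by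
  unfold Pre_decipher_file_name; infer_instance

def pvWitness_decipher_file_name : String := "wall1-x2y.png"

def Spec_decipher_file_name (name : String) (out : List (String × Int)) : Prop := out = decipher_file_name_alt name
instance (name : String) (out : List (String × Int)) : Decidable (Spec_decipher_file_name name out) := by unfold Spec_decipher_file_name; infer_instance

-- ===== CLAIM (what is proved, stated in full; the proofs are below) =====
def Claim_equal_decipher_file_name : Prop := ∀ (name : String), Dom_decipher_file_name name → Pre_decipher_file_name name → Spec_decipher_file_name name (decipher_file_name name)

-- ===== LEMMAS AND PROOFS =====

-- structural single-char split (what splitOn computes for the separator ['-']; lemma pvSplit_splitOn)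
def pvSplit : List Char → List (List Char)
  | [] => [[]]
  | c :: rest =>
    if c = '-' then [] :: pvSplit rest
    else match pvSplit rest with
      | s :: r => (c :: s) :: r
      | [] => [[c]]

lemma pvSplit_ne_nil (l : List Char) : pvSplit l ≠ [] := by
  cases l with
  | nil => simp [pvSplit]
  | cons c rest =>
    simp only [pvSplit]
    split_ifs
    · simp
    · cases h : pvSplit rest <;> simp

-- A's in-flight (label, orientation) folded over the head segment
def pvHead (lab : List Char) (ori : Int) (s : List Char) : String × Int :=
  (String.ofList (lab ++ s.filter (fun c => !(PySem.Chars.isdigit c))),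
   match (s.filter (fun c => PySem.Chars.isdigit c)).getLast? with
   | some d => ((d.toNat : Int) - 48)
   | none => ori)

def pvFirst (lab : List Char) (ori : Int) : List (List Char) → List (String × Int)
  | [] => []
  | s :: r => pvHead lab ori s :: r.map pvSeg

lemma pvHead_nil_zero (s : List Char) : pvHead [] 0 s = pvSeg s := by
  simp [pvHead, pvSeg]

lemma pvFirst_nil_zero (segs : List (List Char)) : pvFirst [] 0 segs = segs.map pvSeg := by
  cases segs <;> simp [pvFirst, pvHead_nil_zero]

lemma pvFirst_cons (lab : List Char) (ori : Int) (s : List Char) (r : List (List Char)) :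
    pvFirst lab ori (s :: r) = pvHead lab ori s :: r.map pvSeg := rfl

lemma pvHead_nil (lab : List Char) (ori : Int) : pvHead lab ori [] = (String.ofList lab, ori) := by
  simp [pvHead]

lemma pvHead_cons_digit (lab : List Char) (ori : Int) (c : Char) (s : List Char)
    (h : PySem.Chars.isdigit c = true) :
    pvHead lab ori (c :: s) = pvHead lab ((c.toNat : Int) - 48) s := by
  unfold pvHead
  rw [show List.filter (fun c => !(PySem.Chars.isdigit c)) (c :: s)
        = List.filter (fun c => !(PySem.Chars.isdigit c)) s by simp [h],
      show List.filter (fun c => PySem.Chars.isdigit c) (c :: s)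
        = c :: List.filter (fun c => PySem.Chars.isdigit c) s by simp [h]]
  cases hls : (List.filter (fun c => PySem.Chars.isdigit c) s).getLast? with
  | none =>
      have h0 : List.filter (fun c => PySem.Chars.isdigit c) s = [] := by simpa using hls
      rw [h0]
      simp
  | some d =>
      obtain ⟨t, ht⟩ := List.getLast?_eq_some_iff.mp hls
      rw [ht, show (c :: (t ++ [d])).getLast? = some d by
        rw [← List.cons_append, List.getLast?_concat]]

lemma pvHead_cons_nondigit (lab : List Char) (ori : Int) (c : Char) (s : List Char)
    (h : ¬ PySem.Chars.isdigit c = true) :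
    pvHead lab ori (c :: s) = pvHead (lab ++ [c]) ori s := by
  unfold pvHead
  simp [h]

lemma pvSplit_cons_dash (l : List Char) : pvSplit ('-' :: l) = [] :: pvSplit l := by
  simp [pvSplit]

lemma pvSplit_cons_ne (c : Char) (l s : List Char) (r : List (List Char))
    (hc : c ≠ '-') (h : pvSplit l = s :: r) : pvSplit (c :: l) = (c :: s) :: r := by
  simp [pvSplit, hc, h]

lemma pvTakeWhile_cons_ne (c : Char) (l : List Char) (h : c ≠ '.') :
    (c :: l).takeWhile (· ≠ '.') = c :: l.takeWhile (· ≠ '.') := by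
  simp [List.takeWhile, h]

lemma pvSplit_exists (l : List Char) : ∃ s r, pvSplit l = s :: r := by
  cases h : pvSplit l with
  | nil => exact absurd h (pvSplit_ne_nil _)
  | cons s r => exact ⟨s, r, rfl⟩

-- main loop invariant: A's loop on a string containing '.' computes the per-segment values
lemma pvLoopA_eq (cs : List Char) : ∀ (decoded : List (String × Int)) (lab : List Char) (ori : Int),
    '.' ∈ cs →
    pvLoopA cs decoded lab ori
      = some (decoded ++ pvFirst lab ori (pvSplit (cs.takeWhile (· ≠ '.')))) := by
  induction cs with
  | nil => intro _ _ _ h; simp at h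
  | cons c rest ih =>
    intro decoded lab ori hmem
    by_cases hdot : c = '.'
    · subst hdot
      rw [show (('.' : Char) :: rest).takeWhile (· ≠ '.') = [] by simp [List.takeWhile]]
      rw [show pvSplit [] = [[]] from rfl, pvFirst_cons, pvHead_nil]
      simp [pvLoopA]
    · have hrest : '.' ∈ rest := by
        rcases List.mem_cons.mp hmem with h | h
        · exact absurd h.symm hdot
        · exact h
      rw [pvTakeWhile_cons_ne c rest hdot]
      obtain ⟨s, r, hsplit⟩ := pvSplit_exists (rest.takeWhile (· ≠ '.'))
      by_cases hdash : c = '-'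
      · subst hdash
        rw [show pvLoopA ('-' :: rest) decoded lab ori
              = pvLoopA rest (decoded ++ [(String.ofList lab, ori)]) [] 0 by simp [pvLoopA]]
        rw [ih _ [] 0 hrest, pvSplit_cons_dash, hsplit, pvFirst_nil_zero,
          show pvFirst lab ori ([] :: s :: r) = pvHead lab ori [] :: (s :: r).map pvSeg from rfl,
          pvHead_nil]
        simp
      · rw [pvSplit_cons_ne c _ s r hdash hsplit, pvFirst_cons]
        by_cases hdig : PySem.Chars.isdigit c = true
        · rw [show pvLoopA (c :: rest) decoded lab ori
                = pvLoopA rest decoded lab ((c.toNat : Int) - 48) by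
              simp [pvLoopA, hdot, hdash, hdig]]
          rw [ih _ lab ((c.toNat : Int) - 48) hrest, hsplit, pvFirst_cons,
            pvHead_cons_digit lab ori c s hdig]
        · rw [show pvLoopA (c :: rest) decoded lab ori
                = pvLoopA rest decoded (lab ++ [c]) ori by
              simp [pvLoopA, hdot, hdash, hdig]]
          rw [ih _ (lab ++ [c]) ori hrest, hsplit, pvFirst_cons,
            pvHead_cons_nondigit lab ori c s hdig]

-- splitOn with separator ['-'] is pvSplit
lemma pvGo_eq (fuel : Nat) : ∀ (l cur : List Char) (acc : List (List Char)), l.length < fuel →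
    PySem.Chars.splitOn.go ['-'] fuel l cur acc
      = acc.reverse ++ (match pvSplit l with
          | s :: r => (cur.reverse ++ s) :: r
          | [] => []) := by
  induction fuel with
  | zero => intro l cur acc h; exact absurd h (Nat.not_lt_zero _)
  | succ f ih =>
    intro l cur acc h
    cases l with
    | nil =>
      simp [PySem.Chars.splitOn.go, pvSplit]
    | cons c rest =>
      by_cases hc : c = '-'
      · subst hc
        rw [show PySem.Chars.splitOn.go ['-'] (f+1) ('-' :: rest) cur acc
              = PySem.Chars.splitOn.go ['-'] f rest [] (cur.reverse :: acc) by
            simp [PySem.Chars.splitOn.go, List.isPrefixOf]]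
        rw [ih rest [] (cur.reverse :: acc) (by simpa using Nat.lt_of_succ_lt_succ h)]
        obtain ⟨s, r, hs⟩ : ∃ s r, pvSplit rest = s :: r := by
          cases hx : pvSplit rest with
          | nil => exact absurd hx (pvSplit_ne_nil _)
          | cons s r => exact ⟨s, r, rfl⟩
        simp [pvSplit, hs]
      · rw [show PySem.Chars.splitOn.go ['-'] (f+1) (c :: rest) cur acc
              = PySem.Chars.splitOn.go ['-'] f rest (c :: cur) acc by
            simp [PySem.Chars.splitOn.go, List.isPrefixOf, Ne.symm hc]]
        rw [ih rest (c :: cur) acc (by simpa using Nat.lt_of_succ_lt_succ h)]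
        obtain ⟨s, r, hs⟩ : ∃ s r, pvSplit rest = s :: r := by
          cases hx : pvSplit rest with
          | nil => exact absurd hx (pvSplit_ne_nil _)
          | cons s r => exact ⟨s, r, rfl⟩
        simp [pvSplit, hc, hs]

lemma pvSplit_splitOn (cs : List Char) : PySem.Chars.splitOn cs ['-'] = pvSplit cs := by
  show PySem.Chars.splitOn.go ['-'] (cs.length + 1) cs [] [] = pvSplit cs
  rw [pvGo_eq (cs.length + 1) cs [] [] (by omega)]
  obtain ⟨s, r, hs⟩ : ∃ s r, pvSplit cs = s :: r := by
    cases hx : pvSplit cs with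
    | nil => exact absurd hx (pvSplit_ne_nil _)
    | cons s r => exact ⟨s, r, rfl⟩
  simp [hs]

-- the prefix before the first '.' is the takeWhile
lemma pvTakeWhile_eq_take (cs : List Char) : ∀ (n : Nat),
    (∀ j, j < n → ∀ (h2 : j < cs.length), cs[j] ≠ '.') → ∀ (h : n < cs.length), cs[n] = '.' →
    cs.takeWhile (· ≠ '.') = cs.take n := by
  induction cs with
  | nil => intro n _ h; simp at h
  | cons c rest ih =>
    intro n hlt h hn
    cases n with
    | zero => simp at hn; simp [List.takeWhile, hn]
    | succ m =>
      have hc : c ≠ '.' := by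
        have := hlt 0 (by omega) (by simp)
        simpa using this
      have hres : rest.takeWhile (· ≠ '.') = rest.take m := by
        apply ih m
        · intro j hj hj2
          have := hlt (j+1) (by omega) (by simpa using Nat.succ_lt_succ hj2)
          simpa using this
        · simpa using hn
      rw [pvTakeWhile_cons_ne c rest hc, hres, List.take_succ_cons]

lemma pvFind_dot (cs : List Char) (hmem : '.' ∈ cs) :
    PySem.Chars.find cs ['.'] ≠ -1 ∧
    cs.take (PySem.Chars.find cs ['.']).toNat = cs.takeWhile (· ≠ '.') := by
  have hinf : ['.'] <:+: cs := by
    obtain ⟨p, q, h⟩ := List.append_of_mem hmem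
    exact ⟨p, q, by rw [h]; simp⟩
  have hne : PySem.Chars.find cs ['.'] ≠ -1 := (PySem.Chars.find_ne_neg_one_iff cs ['.']).mpr hinf
  have hnn : 0 ≤ PySem.Chars.find cs ['.'] := by
    have := PySem.Chars.neg_one_le_find cs ['.']
    omega
  obtain ⟨hpre, hmin⟩ := PySem.Chars.find_spec hnn
  set n := (PySem.Chars.find cs ['.']).toNat with hn
  have hlen : n < cs.length := by
    rcases hpre with ⟨t, ht⟩
    have : (cs.drop n).length ≠ 0 := by
      rw [← ht]; simp
    simp at this
    omega
  have hcn : cs[n] = '.' := by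
    rcases hpre with ⟨t, ht⟩
    have h1 : cs[n]? = some '.' := by
      rw [← List.head?_drop, ← ht]; rfl
    rw [List.getElem?_eq_getElem hlen] at h1
    exact (Option.some.inj h1)
  refine ⟨hne, ?_⟩
  rw [pvTakeWhile_eq_take cs n ?_ hlen hcn]
  intro j hj hj2 hcj
  apply hmin j hj
  refine ⟨(cs.drop j).tail, ?_⟩
  have : cs.drop j = '.' :: (cs.drop j).tail := by
    have hdj : (cs.drop j).head? = some '.' := by
      rw [List.head?_drop, List.getElem?_eq_getElem hj2, hcj]
    cases hdd : cs.drop j with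
    | nil => rw [hdd] at hdj; simp at hdj
    | cons a b => rw [hdd] at hdj; simp at hdj; simp [hdj]
  simpa using this.symm

-- ===== VERDICT (by name: the statement is the Claim_ definition above) =====
theorem decipher_file_name_spec : Claim_equal_decipher_file_name := by
  intro name _ hpre
  unfold Spec_decipher_file_name decipher_file_name decipher_file_name_alt
  obtain ⟨hne, htake⟩ := pvFind_dot name.toList hpre
  have hnn : 0 ≤ PySem.Chars.find name.toList ['.'] := by
    have := PySem.Chars.neg_one_le_find name.toList ['.']
    omega
  rw [pvLoopA_eq name.toList [] [] 0 hpre]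
  simp only [if_neg hne, PySem.Chars.slice_eq_listSlice, PySem.List.slice_to _ hnn, htake,
    pvSplit_splitOn, Option.getD_some, List.nil_append, pvFirst_nil_zero]
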